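-- pv_equiv track=rewrite | github.com/dixitomkar1809/Coding-Python | GFG/DynamicProgramming/maxChainLength.py | maxChainLength
-- ===== SOURCE A (Python) =====
-- def maxChainLength(arr):
--     maxChainLength = [1] * len(arr)
--     mcl = 0
--     arr.sort(key=lambda x: x[0])
--     for i in range(1, len(arr)):
--         for j in range(0, i):
--             if arr[i][0] > arr[j][1] and maxChainLength[i] <  maxChainLength[j] + 1:
--                 maxChainLength[i] = maxChainLength[j] + 1
--     for i in range(len(arr)):
--         if mcl < maxChainLength[i]:
--             mcl = maxChainLength[i]
--     return mcl
-- ===== SOURCE B (Python) =====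
-- def maxChainLength(arr):
--     # Like A, sorts arr in place by first element (same observable mutation).
--     arr.sort(key=lambda x: x[0])
--     stairs = []  # undominated (end, chain_length) frontier of processed pairs
--     best = 0
--     for a, b in arr:
--         d = 1 + max((l for e, l in stairs if e < a), default=0)
--         if not any(e <= b and l >= d for e, l in stairs):
--             stairs = [(e, l) for e, l in stairs if not (b <= e and l <= d)]
--             stairs.append((b, d))
--         if d > best:
--             best = d
--     return best
-- ===== Notes on version B (the rewrite author's own statement) =====
-- stated objective: faster
-- what changed: A fills an n-by-n DP table with a nested all-pairs scan and then takes a final max pass; B makes one pass over the sorted list maintaining a pruned dominance frontier of undominated (end, chain-length) pairs plus a running max, so each element is scored against the small frontier instead of every earlier element.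
import Mathlib
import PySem

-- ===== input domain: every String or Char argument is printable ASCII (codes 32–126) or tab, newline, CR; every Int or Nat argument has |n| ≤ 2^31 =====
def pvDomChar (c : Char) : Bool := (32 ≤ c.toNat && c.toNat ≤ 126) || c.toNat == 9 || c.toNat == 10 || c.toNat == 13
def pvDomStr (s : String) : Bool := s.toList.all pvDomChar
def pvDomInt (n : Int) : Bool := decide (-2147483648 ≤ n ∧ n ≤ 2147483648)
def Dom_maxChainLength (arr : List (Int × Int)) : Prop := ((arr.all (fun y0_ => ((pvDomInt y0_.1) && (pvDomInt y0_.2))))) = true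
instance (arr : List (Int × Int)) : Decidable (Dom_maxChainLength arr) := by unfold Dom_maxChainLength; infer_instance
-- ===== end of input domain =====

-- B replaces A's quadratic all-pairs DP scan with a pruned dominance frontier (undominated
-- (end, chain-length) pairs) queried per element; same return value, and like A it sorts the
-- argument list in place (same observable mutation).

-- ===== PORT A =====
def maxChainLength (arr : List (Int × Int)) : Int :=
  let s := PySem.List.sorted arr (fun x => x.1)
  let dp :=
    (PySem.List.pyRange 1 (s.length : Int)).foldl (fun dp i =>
      (PySem.List.pyRange 0 i).foldl (fun dp j =>
        if (PySem.List.pyGetD s i (0, 0)).1 > (PySem.List.pyGetD s j (0, 0)).2 ∧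
           PySem.List.pyGetD dp i 0 < PySem.List.pyGetD dp j 0 + 1
        then PySem.List.pySetD dp i (PySem.List.pyGetD dp j 0 + 1)
        else dp) dp)
      (List.replicate s.length (1 : Int))
  (PySem.List.pyRange 0 (s.length : Int)).foldl (fun mcl i =>
    if mcl < PySem.List.pyGetD dp i 0 then PySem.List.pyGetD dp i 0 else mcl) 0

-- ===== PORT B =====
-- max(l for e, l in stairs if e < x) with default 0
def pvQuery (stairs : List (Int × Int)) (x : Int) : Int :=
  stairs.foldl (fun m q => if q.1 < x then max m q.2 else m) 0

-- one iteration of B's loop: state = (stairs, best)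
def pvStepB (st : List (Int × Int) × Int) (p : Int × Int) : List (Int × Int) × Int :=
  let d := 1 + pvQuery st.1 p.1
  let stairs :=
    if st.1.any (fun q => decide (q.1 ≤ p.2) && decide (d ≤ q.2)) then st.1
    else st.1.filter (fun q => !(decide (p.2 ≤ q.1) && decide (q.2 ≤ d))) ++ [(p.2, d)]
  (stairs, if st.2 < d then d else st.2)

def maxChainLength_alt (arr : List (Int × Int)) : Int :=
  let s := PySem.List.sorted arr (fun x => x.1)
  (s.foldl pvStepB ([], 0)).2

-- ===== PRECONDITION & SPEC =====
def Spec_maxChainLength (arr : List (Int × Int)) (out : Int) : Prop := out = maxChainLength_alt arr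
instance (arr : List (Int × Int)) (out : Int) : Decidable (Spec_maxChainLength arr out) := by unfold Spec_maxChainLength; infer_instance

-- ===== CLAIM (what is proved, stated in full; the proofs are below) =====
def Claim_equal_maxChainLength : Prop := ∀ (arr : List (Int × Int)), Dom_maxChainLength arr → Spec_maxChainLength arr (maxChainLength arr)

-- ===== LEMMAS AND PROOFS =====

-- Reference model: the list of (second component, DP chain length) pairs, in order.
def pvRefStep (T : List (Int × Int)) (p : Int × Int) : List (Int × Int) :=
  T ++ [(p.2, 1 + pvQuery T p.1)]

def pvRefFrom (T : List (Int × Int)) (s : List (Int × Int)) : List (Int × Int) :=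
  s.foldl pvRefStep T

def pvBest (T : List (Int × Int)) : Int :=
  T.foldl (fun m q => max m q.2) 0

-- ---- basic query lemmas ----
lemma pvQuery_foldl_mono (S : List (Int × Int)) (x : Int) :
    ∀ m, m ≤ S.foldl (fun m q => if q.1 < x then max m q.2 else m) m := by
  induction S with
  | nil => simp
  | cons q S ih =>
    intro m
    simp only [List.foldl_cons]
    refine le_trans ?_ (ih _)
    split
    · exact le_max_left _ _
    · exact le_rfl

lemma pvQuery_nonneg' (S : List (Int × Int)) (x : Int) :
    0 ≤ S.foldl (fun m q => if q.1 < x then max m q.2 else m) 0 :=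
  pvQuery_foldl_mono S x 0

lemma pvQuery_foldl_init (S : List (Int × Int)) (x : Int) :
    ∀ m, 0 ≤ m → S.foldl (fun m q => if q.1 < x then max m q.2 else m) m = max m (pvQuery S x) := by
  induction S with
  | nil => intro m hm; simp [pvQuery, max_eq_left hm]
  | cons q S ih =>
    intro m hm
    simp only [pvQuery, List.foldl_cons] at *
    have hfm : 0 ≤ (if q.1 < x then max m q.2 else m) := by
      split
      · exact le_trans hm (le_max_left _ _)
      · exact hm
    have hf0 : 0 ≤ (if q.1 < x then max 0 q.2 else (0 : Int)) := by
      split <;> simp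
    rw [ih _ hfm, ih _ hf0]
    have h0 := pvQuery_nonneg' S x
    simp only [max_def]
    split_ifs <;> omega

lemma pvQuery_nonneg (S : List (Int × Int)) (x : Int) : 0 ≤ pvQuery S x :=
  pvQuery_nonneg' S x

lemma pvQuery_cons (q : Int × Int) (S : List (Int × Int)) (x : Int) :
    pvQuery (q :: S) x = max (if q.1 < x then max 0 q.2 else 0) (pvQuery S x) := by
  show List.foldl _ _ _ = _
  rw [List.foldl_cons, pvQuery_foldl_init _ _ _ (by split <;> simp)]

lemma pvQuery_append (S T : List (Int × Int)) (x : Int) :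
    pvQuery (S ++ T) x = max (pvQuery S x) (pvQuery T x) := by
  show List.foldl _ _ _ = _
  rw [List.foldl_append]
  exact pvQuery_foldl_init _ _ _ (pvQuery_nonneg' S x)

lemma le_pvQuery_of_mem {q : Int × Int} {S : List (Int × Int)} {x : Int}
    (hq : q ∈ S) (hx : q.1 < x) : q.2 ≤ pvQuery S x := by
  induction S with
  | nil => cases hq
  | cons a S ih =>
    rw [pvQuery_cons]
    rcases List.mem_cons.mp hq with h | h
    · subst h
      rw [if_pos hx]
      exact le_trans (le_max_right 0 q.2) (le_max_left _ _)
    · exact le_trans (ih h) (le_max_right _ _)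

lemma pvQuery_le {S : List (Int × Int)} {x c : Int}
    (h : ∀ q ∈ S, q.1 < x → q.2 ≤ c) (hc : 0 ≤ c) : pvQuery S x ≤ c := by
  induction S with
  | nil => simpa [pvQuery] using hc
  | cons a S ih =>
    rw [pvQuery_cons]
    refine max_le ?_ (ih (fun q hq => h q (List.mem_cons_of_mem a hq)))
    split_ifs with ha
    · exact max_le hc (h a List.mem_cons_self ha)
    · exact hc

lemma pvQuery_exists (S : List (Int × Int)) (x : Int) :
    pvQuery S x = 0 ∨ ∃ q ∈ S, q.1 < x ∧ pvQuery S x = q.2 := by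
  induction S with
  | nil => left; rfl
  | cons a S ih =>
    rw [pvQuery_cons]
    rcases max_cases (if a.1 < x then max 0 a.2 else 0) (pvQuery S x) with ⟨h1, _⟩ | ⟨h1, _⟩
    · rw [h1]
      split_ifs with ha
      · rcases max_cases 0 a.2 with ⟨h2, _⟩ | ⟨h2, _⟩
        · left; exact h2
        · right; exact ⟨a, List.mem_cons_self, ha, h2⟩
      · left; rfl
    · rw [h1]
      rcases ih with h | ⟨q, hq, hx, he⟩
      · left; exact h
      · right; exact ⟨q, List.mem_cons_of_mem a hq, hx, he⟩

-- ---- B-side: the pruned frontier answers every query like the full list ----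
lemma pvStepB_equiv {S T : List (Int × Int)} (b d : Int) (hd : 0 ≤ d)
    (h : ∀ x, pvQuery S x = pvQuery T x) (x : Int) :
    pvQuery (if S.any (fun q => decide (q.1 ≤ b) && decide (d ≤ q.2)) then S
             else S.filter (fun q => !(decide (b ≤ q.1) && decide (q.2 ≤ d))) ++ [(b, d)]) x
      = pvQuery (T ++ [(b, d)]) x := by
  have hsingle : pvQuery [(b, d)] x = if b < x then d else 0 := by
    show List.foldl _ _ _ = _
    simp only [List.foldl_cons, List.foldl_nil]
    split_ifs <;> simp [max_eq_right hd]
  rw [pvQuery_append, hsingle, ← h x]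
  split
  · -- some frontier entry dominates (b, d): skip the insert
    next hany =>
      rcases List.any_eq_true.mp hany with ⟨q, hqS, hq⟩
      simp only [Bool.and_eq_true, decide_eq_true_eq] at hq
      symm
      apply max_eq_left
      split_ifs with hbx
      · exact le_trans hq.2 (le_pvQuery_of_mem hqS (lt_of_le_of_lt hq.1 hbx))
      · exact pvQuery_nonneg S x
  · -- prune entries dominated by (b, d), then append it
    next hany =>
      rw [pvQuery_append, hsingle]
      have hfle : pvQuery (S.filter (fun q => !(decide (b ≤ q.1) && decide (q.2 ≤ d)))) x ≤ pvQuery S x := by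
        refine pvQuery_le (fun q hq hx => ?_) (pvQuery_nonneg S x)
        exact le_pvQuery_of_mem (List.mem_of_mem_filter hq) hx
      have hSle : pvQuery S x ≤ max (pvQuery (S.filter (fun q => !(decide (b ≤ q.1) && decide (q.2 ≤ d)))) x) (if b < x then d else 0) := by
        rcases pvQuery_exists S x with h0 | ⟨q, hqS, hqx, hqe⟩
        · rw [h0]
          refine le_trans (pvQuery_nonneg _ x) (le_max_left _ _)
        · rw [hqe]
          by_cases hkeep : (b ≤ q.1 ∧ q.2 ≤ d)
          · have hbx : b < x := lt_of_le_of_lt hkeep.1 hqx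
            rw [if_pos hbx]
            exact le_trans hkeep.2 (le_max_right _ _)
          · have hmem : q ∈ S.filter (fun q => !(decide (b ≤ q.1) && decide (q.2 ≤ d))) := by
              refine List.mem_filter.mpr ⟨hqS, ?_⟩
              simp only [Bool.not_eq_eq_eq_not, Bool.not_true, Bool.and_eq_false_iff,
                decide_eq_false_iff_not, not_le]
              simp only [not_and, not_le] at hkeep
              by_cases hb : b ≤ q.1
              · right; exact hkeep hb
              · left; exact lt_of_not_ge hb
            exact le_trans (le_pvQuery_of_mem hmem hqx) (le_max_left _ _)
      apply le_antisymm
      · exact max_le (le_trans hfle (le_max_left _ _)) (le_max_right _ _)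
      · exact max_le hSle (le_max_right _ _)

lemma pvBest_append_single (T : List (Int × Int)) (b d : Int) :
    pvBest (T ++ [(b, d)]) = max (pvBest T) d := by
  simp [pvBest, List.foldl_append]

lemma pvFoldB (s : List (Int × Int)) :
    ∀ (S T : List (Int × Int)) (best : Int),
      (∀ x, pvQuery S x = pvQuery T x) → best = pvBest T →
      (s.foldl pvStepB (S, best)).2 = pvBest (pvRefFrom T s) := by
  induction s with
  | nil => intro S T best h hbest; simpa [pvRefFrom] using hbest
  | cons p s ih =>
    intro S T best h hbest
    have hd : (0 : Int) ≤ 1 + pvQuery S p.1 := by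
      have := pvQuery_nonneg S p.1; omega
    have hstep := pvStepB_equiv (S := S) (T := T) p.2 (1 + pvQuery S p.1) hd h
    simp only [List.foldl_cons]
    have hT : pvRefFrom T (p :: s) = pvRefFrom (pvRefStep T p) s := rfl
    rw [hT]
    refine ih _ _ _ ?_ ?_
    · intro x
      have hdq : 1 + pvQuery S p.1 = 1 + pvQuery T p.1 := by rw [h p.1]
      simpa [pvStepB, pvRefStep, hdq] using hstep x
    · show (if best < 1 + pvQuery S p.1 then 1 + pvQuery S p.1 else best) = _
      rw [pvRefStep, pvBest_append_single, ← hbest, h p.1]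
      rcases lt_or_ge best (1 + pvQuery T p.1) with hlt | hge
      · rw [if_pos hlt, max_eq_right (le_of_lt hlt)]
      · rw [if_neg (not_lt.mpr hge), max_eq_left hge]

lemma alt_eq_best (arr : List (Int × Int)) :
    maxChainLength_alt arr
      = pvBest (pvRefFrom [] (PySem.List.sorted arr (fun x => x.1))) := by
  show (List.foldl pvStepB ([], 0) _).2 = _
  exact pvFoldB _ [] [] 0 (fun _ => rfl) rfl

-- ---- A-side ----
-- entry values of the reference list
def pvR (s : List (Int × Int)) (k : Nat) : List (Int × Int) := pvRefFrom [] (s.take k)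

def pvD (s : List (Int × Int)) (j : Nat) : Int :=
  1 + pvQuery (pvR s j) (s.getD j (0, 0)).1

lemma pvQuery_append_single (T : List (Int × Int)) (b d x : Int) :
    pvQuery (T ++ [(b, d)]) x = max (pvQuery T x) (if b < x then max 0 d else 0) := by
  rw [pvQuery_append]; rfl

-- generic list-surgery helpers
lemma getD_append_mid {α : Type} (A : List α) (w : α) (rest : List α) (d : α) :
    (A ++ w :: rest).getD A.length d = w := by
  induction A with
  | nil => rfl
  | cons a A ih => simpa using ih

lemma getD_append_lt {α : Type} (A : List α) (w : α) (rest : List α) (d : α) {j : Nat}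
    (hj : j < A.length) : (A ++ w :: rest).getD j d = A.getD j d := by
  induction A generalizing j with
  | nil => cases hj
  | cons a A ih =>
    cases j with
    | zero => rfl
    | succ j => simpa using ih (by simpa using hj)

lemma set_append_mid {α : Type} (A : List α) (w v : α) (rest : List α) :
    (A ++ w :: rest).set A.length v = A ++ v :: rest := by
  induction A with
  | nil => rfl
  | cons a A ih => simpa using ih

lemma pvRefFrom_append (T : List (Int × Int)) (s t : List (Int × Int)) :
    pvRefFrom T (s ++ t) = pvRefFrom (pvRefFrom T s) t := by
  simp [pvRefFrom, List.foldl_append]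

lemma pvR_succ (s : List (Int × Int)) (k : Nat) (hk : k < s.length) :
    pvR s (k + 1) = pvR s k ++ [((s.getD k (0,0)).2, pvD s k)] := by
  have ht : s.take (k + 1) = s.take k ++ [s[k]] := by
    rw [List.take_succ, List.getElem?_eq_getElem hk]
    rfl
  show pvRefFrom [] (s.take (k+1)) = _
  rw [ht, pvRefFrom_append]
  show pvRefStep (pvR s k) s[k] = _
  rw [pvRefStep, pvD]
  rw [List.getD_eq_getElem s (0,0) hk]

lemma pvR_length (s : List (Int × Int)) (k : Nat) (hk : k ≤ s.length) :
    (pvR s k).length = k := by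
  induction k with
  | zero => rfl
  | succ k ih =>
    rw [pvR_succ s k (by omega)]
    simp [ih (by omega)]

lemma pvD_pos (s : List (Int × Int)) (j : Nat) : 1 ≤ pvD s j := by
  have := pvQuery_nonneg (pvR s j) ((s.getD j (0,0)).1)
  unfold pvD
  omega

lemma pvR_getElem (s : List (Int × Int)) (k j : Nat) (hk : k ≤ s.length) (hj : j < k) :
    (pvR s k).getD j (0, 0) = ((s.getD j (0,0)).2, pvD s j) := by
  induction k with
  | zero => omega
  | succ k ih =>
    have hk' : k < s.length := by omega
    rw [pvR_succ s k hk']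
    rcases Nat.lt_or_ge j k with hjk | hjk
    · rw [getD_append_lt _ _ _ _ (by rw [pvR_length s k (le_of_lt hk')]; exact hjk)]
      exact ih (le_of_lt hk') hjk
    · have hjeq : j = k := by omega
      subst hjeq
      have hlen : (pvR s j).length = j := pvR_length s j (le_of_lt hk')
      have h := getD_append_mid (pvR s j) ((s.getD j (0,0)).2, pvD s j) [] (0,0)
      rw [hlen] at h
      exact h

-- the inner j-loop computes max 1 (1 + query) at slot i
lemma innerLoop (s : List (Int × Int)) (i : Nat) (hi : i < s.length)
    (A rest : List Int) (hA : ∀ j < i, A.getD j 0 = pvD s j) (hlen : A.length = i) :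
    ∀ (m : Nat), m ≤ i → ∀ (v : Int), 1 ≤ v →
      (PySem.List.pyRange 0 (m : Int)).foldl (fun dp j =>
        if (PySem.List.pyGetD s (i : Int) (0, 0)).1 > (PySem.List.pyGetD s j (0, 0)).2 ∧
           PySem.List.pyGetD dp (i : Int) 0 < PySem.List.pyGetD dp j 0 + 1
        then PySem.List.pySetD dp (i : Int) (PySem.List.pyGetD dp j 0 + 1)
        else dp) (A ++ v :: rest)
      = A ++ (max v (1 + pvQuery (pvR s m) (s.getD i (0,0)).1)) :: rest := by
  intro m
  induction m with
  | zero =>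
    intro _ v hv
    rw [show ((0 : Nat) : Int) = 0 by simp, PySem.List.pyRange_one_eq_nil le_rfl]
    simp only [List.foldl_nil]
    have hR0 : pvR s 0 = [] := rfl
    rw [hR0, show pvQuery [] (s.getD i (0,0)).1 = 0 from rfl]
    rw [max_eq_left (by omega)]
  | succ m ih =>
    intro hm v hv
    have hmi : m ≤ i := by omega
    have hmn : m < s.length := by omega
    rw [show (((m + 1 : Nat)) : Int) = (m : Int) + 1 by push_cast; ring]
    rw [PySem.List.pyRange_one_succ_right (by positivity), List.foldl_append]
    rw [ih hmi v hv]
    simp only [List.foldl_cons, List.foldl_nil]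
    set x := (s.getD i (0,0)).1 with hx
    set w := max v (1 + pvQuery (pvR s m) x) with hw
    have hgetI : PySem.List.pyGetD (A ++ w :: rest) (i : Int) 0 = w := by
      rw [PySem.List.pyGetD_natCast, ← hlen, getD_append_mid]
    have hgetM : PySem.List.pyGetD (A ++ w :: rest) (m : Int) 0 = pvD s m := by
      rw [PySem.List.pyGetD_natCast, getD_append_lt _ _ _ _ (by omega), hA m (by omega)]
    have hsetI : ∀ z, PySem.List.pySetD (A ++ w :: rest) (i : Int) z = A ++ z :: rest := by
      intro z
      rw [PySem.List.pySetD_of_nonneg _ _ (by positivity)]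
      have : ((i : Int)).toNat = A.length := by omega
      rw [this, set_append_mid]
    rw [hgetI, hgetM, hsetI]
    simp only [PySem.List.pyGetD_natCast]
    rw [pvR_succ s m hmn, pvQuery_append_single]
    have hx2 : (s.getD i (0,0)).1 = x := rfl
    have hQ := pvQuery_nonneg (pvR s m) x
    have hD := pvD_pos s m
    split_ifs with h1 h2 h3 <;>
      refine congrArg (fun z => A ++ z :: rest) ?_ <;>
      · simp only [max_def] at hw ⊢
        split_ifs at hw ⊢ <;> omega

-- the outer i-loop turns the all-ones array into the DP values
lemma outerLoop (s : List (Int × Int)) :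
    ∀ (k : Nat), k ≤ s.length →
      (PySem.List.pyRange 1 (k : Int)).foldl (fun dp i =>
        (PySem.List.pyRange 0 i).foldl (fun dp j =>
          if (PySem.List.pyGetD s i (0, 0)).1 > (PySem.List.pyGetD s j (0, 0)).2 ∧
             PySem.List.pyGetD dp i 0 < PySem.List.pyGetD dp j 0 + 1
          then PySem.List.pySetD dp i (PySem.List.pyGetD dp j 0 + 1)
          else dp) dp) (List.replicate s.length (1 : Int))
      = (pvR s k).map (·.2) ++ List.replicate (s.length - k) 1 := by
  intro k
  induction k with
  | zero =>
    intro _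
    rw [show ((0 : Nat) : Int) = 0 by simp, PySem.List.pyRange_one_eq_nil (by omega)]
    simp [pvR, pvRefFrom]
  | succ k ih =>
    intro hk
    have hkn : k < s.length := by omega
    rcases Nat.eq_zero_or_pos k with hk0 | hkpos
    · -- k = 0: range(1, 1) is empty and the first DP entry is 1
      subst hk0
      rw [show ((1 : Nat) : Int) = 1 by simp, PySem.List.pyRange_one_eq_nil le_rfl]
      simp only [List.foldl_nil]
      rw [pvR_succ s 0 hkn]
      have hD0 : pvD s 0 = 1 := by
        unfold pvD
        rw [show pvR s 0 = [] from rfl, show pvQuery [] (s.getD 0 (0,0)).1 = 0 from rfl]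
        norm_num
      rw [hD0]
      have : s.length = (s.length - 1) + 1 := by omega
      rw [this]
      simp only [List.replicate_succ]
      rw [show pvR s 0 = [] from rfl]
      simp
    · rw [show (((k + 1 : Nat)) : Int) = (k : Int) + 1 by push_cast; ring]
      rw [PySem.List.pyRange_one_succ_right (by exact_mod_cast hkpos), List.foldl_append]
      rw [ih (by omega)]
      simp only [List.foldl_cons, List.foldl_nil]
      have hrep : List.replicate (s.length - k) (1 : Int) = 1 :: List.replicate (s.length - (k+1)) 1 := by
        have : s.length - k = (s.length - (k+1)) + 1 := by omega
        rw [this, List.replicate_succ]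
      rw [hrep]
      have hAl : ((pvR s k).map (fun x => x.2)).length = k := by
        rw [List.length_map, pvR_length s k (le_of_lt hkn)]
      have hA : ∀ j < k, ((pvR s k).map (fun x => x.2)).getD j 0 = pvD s j := by
        intro j hj
        rw [List.getD_eq_getElem _ _ (by omega), List.getElem_map]
        have h := pvR_getElem s k j (le_of_lt hkn) hj
        rw [List.getD_eq_getElem _ _ (by rw [pvR_length s k (le_of_lt hkn)]; omega)] at h
        rw [h]
      rw [innerLoop s k hkn ((pvR s k).map (fun x => x.2)) (List.replicate (s.length - (k+1)) 1) hA hAl k le_rfl 1 le_rfl]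
      have hmax : max 1 (1 + pvQuery (pvR s k) (s.getD k (0,0)).1) = pvD s k := by
        unfold pvD
        exact max_eq_right (by have := pvQuery_nonneg (pvR s k) ((s.getD k (0,0)).1); omega)
      rw [hmax, pvR_succ s k hkn]
      simp

lemma foldl_if_max (T : List (Int × Int)) :
    ∀ init : Int, T.foldl (fun m q => if m < q.2 then q.2 else m) init
      = T.foldl (fun m q => max m q.2) init := by
  induction T with
  | nil => intro _; rfl
  | cons q T ih =>
    intro init
    simp only [List.foldl_cons]
    rw [show (if init < q.2 then q.2 else init) = max init q.2 from by
      rcases le_or_gt q.2 init with h | h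
      · rw [if_neg (not_lt.mpr h), max_eq_left h]
      · rw [if_pos h, max_eq_right (le_of_lt h)]]
    exact ih _

lemma a_eq_best (arr : List (Int × Int)) :
    maxChainLength arr
      = pvBest (pvRefFrom [] (PySem.List.sorted arr (fun x => x.1))) := by
  simp only [maxChainLength]
  rw [outerLoop (PySem.List.sorted arr (fun x => x.1)) (PySem.List.sorted arr (fun x => x.1)).length le_rfl]
  simp only [Nat.sub_self, List.replicate_zero, List.append_nil]
  have hR : pvR (PySem.List.sorted arr (fun x => x.1)) (PySem.List.sorted arr (fun x => x.1)).length
      = pvRefFrom [] (PySem.List.sorted arr (fun x => x.1)) := by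
    show pvRefFrom [] _ = _
    rw [List.take_length]
  rw [hR]
  have hdl : (List.map (fun x => x.2) (pvRefFrom [] (PySem.List.sorted arr (fun x => x.1)))).length
      = (PySem.List.sorted arr (fun x => x.1)).length := by
    have h := pvR_length (PySem.List.sorted arr (fun x => x.1)) (PySem.List.sorted arr (fun x => x.1)).length le_rfl
    rw [hR] at h
    simpa using h
  rw [show (((PySem.List.sorted arr (fun x => x.1)).length : Int))
      = ((List.map (fun x => x.2) (pvRefFrom [] (PySem.List.sorted arr (fun x => x.1)))).length : Int) by rw [hdl]]
  rw [PySem.List.foldl_pyRange_zero_pyGetD' (List.map (fun x => x.2) (pvRefFrom [] (PySem.List.sorted arr (fun x => x.1)))) 0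
      (fun m v => if m < v then v else m) 0]
  rw [List.foldl_map, foldl_if_max]
  rfl

-- ===== VERDICT (by name: the statement is the Claim_ definition above) =====
theorem maxChainLength_spec : Claim_equal_maxChainLength := by
  intro arr _
  unfold Spec_maxChainLength
  rw [a_eq_best, alt_eq_best]
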